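-- pv_equiv track=rewrite | github.com/lena-go/machine_learning_class | hws/shortest_path/algorithm.py | remove_longest_edges
-- ===== SOURCE A (Python) =====
-- def remove_longest_edges(weights: {(int, int): int}, k: int = 3) -> [(int, int, int)]:
--     sorted_edges = [(e1, e2, w) for (e1, e2), w in sorted(weights.items(), key=lambda item: item[1])]
--     if k <= len(sorted_edges):
--         for edge in range(k - 1):
--             try:
--                 del sorted_edges[-1]
--             except IndexError:
--                 pass
--     return sorted_edges
-- ===== SOURCE B (Python) =====
-- import heapq
--
-- def remove_longest_edges(weights, k=3):
--     n = len(weights)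
--     keep = n if k > n else n - k + 1
--     return [(e1, e2, w) for (e1, e2), w in
--             heapq.nsmallest(keep, weights.items(), key=lambda item: item[1])]
-- ===== Notes on version B (the rewrite author's own statement) =====
-- stated objective: idiomatic
-- what changed: Replaces the full stable sort followed by a loop that deletes the last element k-1 times with a single bounded-heap partial selection: compute keep = n if k > n else n - k + 1 and take heapq.nsmallest(keep, ...) keyed on the weight (stable, identical tie order to sorted).
import Mathlib
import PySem

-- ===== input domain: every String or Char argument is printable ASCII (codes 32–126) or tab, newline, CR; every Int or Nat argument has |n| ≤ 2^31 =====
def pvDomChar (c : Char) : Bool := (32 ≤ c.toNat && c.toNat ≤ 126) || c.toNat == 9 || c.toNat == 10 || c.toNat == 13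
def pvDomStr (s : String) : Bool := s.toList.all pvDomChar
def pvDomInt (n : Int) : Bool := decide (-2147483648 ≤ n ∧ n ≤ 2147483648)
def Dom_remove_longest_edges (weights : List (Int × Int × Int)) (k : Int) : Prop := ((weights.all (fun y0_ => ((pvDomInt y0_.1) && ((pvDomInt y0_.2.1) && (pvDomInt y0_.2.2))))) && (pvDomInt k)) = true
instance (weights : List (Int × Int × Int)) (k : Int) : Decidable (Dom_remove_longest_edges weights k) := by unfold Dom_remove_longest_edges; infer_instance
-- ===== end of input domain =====

-- ===== PORT A =====
-- Literal port of A: stable sort by weight, then (if k <= len) a loop deleting the last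
-- element k-1 times (del on an empty list is swallowed by the try/except).
def remove_longest_edges (weights : List (Int × Int × Int)) (k : Int) : List (Int × Int × Int) :=
  let sorted_edges := PySem.List.sorted weights (fun item => item.2.2) false
  if k ≤ (sorted_edges.length : Int) then
    (PySem.List.pyRange 0 (k - 1) 1).foldl
      (fun acc _ => if acc.isEmpty then acc else acc.dropLast) sorted_edges
  else sorted_edges

-- ===== PORT B =====
-- Port of B: compute keep, then heapq.nsmallest(keep, items, key=weight) — a stdlib call,
-- ported as its contract sorted(items, key=weight)[:keep] (documented stable tie order).
def remove_longest_edges_alt (weights : List (Int × Int × Int)) (k : Int) : List (Int × Int × Int) :=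
  let n : Int := weights.length
  let keep : Int := if k > n then n else n - k + 1
  (PySem.List.sorted weights (fun item => item.2.2) false).take keep.toNat

-- ===== PRECONDITION & SPEC =====
def Spec_remove_longest_edges (weights : List (Int × Int × Int)) (k : Int) (out : List (Int × Int × Int)) : Prop := out = remove_longest_edges_alt weights k
instance (weights : List (Int × Int × Int)) (k : Int) (out : List (Int × Int × Int)) : Decidable (Spec_remove_longest_edges weights k out) := by unfold Spec_remove_longest_edges; infer_instance

-- ===== CLAIM (what is proved, stated in full; the proofs are below) =====
def Claim_equal_remove_longest_edges : Prop := ∀ (weights : List (Int × Int × Int)) (k : Int), Dom_remove_longest_edges weights k → Spec_remove_longest_edges weights k (remove_longest_edges weights k)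

-- ===== LEMMAS AND PROOFS =====

-- ===== VERDICT (by name: the statement is the Claim_ definition above) =====
-- the delete-last loop computes a prefix
theorem foldl_dropLast_nil {α β : Type} (xs : List β) :
    xs.foldl (fun acc _ => if acc.isEmpty then acc else acc.dropLast) ([] : List α) = [] := by
  induction xs with
  | nil => rfl
  | cons x xs ih => simpa using ih

theorem foldl_dropLast_eq_take {α β : Type} (xs : List β) (l : List α) :
    xs.foldl (fun acc _ => if acc.isEmpty then acc else acc.dropLast) l
      = l.take (l.length - xs.length) := by
  induction xs generalizing l with
  | nil => simp
  | cons x xs ih =>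
    rw [List.foldl_cons]
    by_cases h : l = []
    · subst h
      simpa using foldl_dropLast_nil xs
    · have hne : l.isEmpty = false := by simpa [List.isEmpty_iff] using h
      have hlen : 1 ≤ l.length := List.length_pos_iff.mpr h
      simp only [hne, Bool.false_eq_true, if_false]
      rw [ih, List.length_dropLast, List.dropLast_eq_take, List.take_take,
        List.length_cons]
      congr 1
      omega

theorem remove_longest_edges_spec : Claim_equal_remove_longest_edges := by
  intro weights k _
  unfold Spec_remove_longest_edges remove_longest_edges remove_longest_edges_alt
  simp only
  set s := PySem.List.sorted weights (fun item => item.2.2) false with hs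
  have hlen : s.length = weights.length := PySem.List.length_sorted ..
  by_cases hk : k ≤ (s.length : Int)
  · rw [if_pos hk, foldl_dropLast_eq_take, PySem.List.length_pyRange_one]
    have hgt : ¬ ((weights.length : Int) < k) := by omega
    rw [if_neg hgt]
    by_cases h1 : 1 ≤ k
    · have he : s.length - ((k : Int) - 1 - 0).toNat
          = ((weights.length : Int) - k + 1).toNat := by omega
      rw [he]
    · -- k ≤ 0: both take at least the whole list
      rw [List.take_of_length_le (by omega), List.take_of_length_le (by omega)]
  · rw [if_neg hk]
    have hgt : (weights.length : Int) < k := by omega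
    rw [if_pos hgt]
    exact (List.take_of_length_le (by omega : s.length ≤ (weights.length : Int).toNat)).symm
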